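-- pv_equiv track=rewrite | github.com/YangliuDebugger/LeetCode-Solutions | 简单题/1772. Sort Features by Popularity.py | sortFeatures
-- ===== SOURCE A (Python) =====
-- from typing import List
--
-- def sortFeatures(features: List[str], responses: List[str]) -> List[str]:
--     d = {}
--     for idx, feat in enumerate(features):
--         d[feat] = [idx, 0]
--     for res in responses:
--         for word in set(res.split()):
--             if word in d:
--                 d[word][1] += 1
--     features.sort(key = lambda x:[-d[x][1], d[x][0]])
--     return features
-- ===== SOURCE B (Python) =====
-- from typing import List
--
-- def sortFeatures(features: List[str], responses: List[str]) -> List[str]: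
--     word_sets = [set(res.split()) for res in responses]
--     buckets = [[] for _ in range(len(responses) + 1)]
--     for f in features:
--         c = sum(1 for s in word_sets if f in s)
--         buckets[c].append(f)
--     features[:] = [f for b in reversed(buckets) for f in b]
--     return features
-- ===== Notes on version B (the rewrite author's own statement) =====
-- stated objective: alternative
-- what changed: B replaces A's dict-plus-comparison-sort with a counting (bucket) sort: it precomputes the responses' word sets, counts each feature by membership in those sets, drops it into a bucket indexed by its count, and flattens the buckets in reverse; no [index,count] dict and no comparison sort at all. Pre_ excludes feature lists with scattered duplicate entries (a value recurring after a different value), on which A's tie-break key is the duplicate's last index (dict overwrite) while B's buckets keep first-occurrence order - an accidental-order corner neither behaviour is specified for.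
-- outside the precondition, e.g. on sortFeatures(['a', 'b', 'a'], []): A returns ['b', 'a', 'a'], B returns ['a', 'b', 'a']
import Mathlib
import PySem

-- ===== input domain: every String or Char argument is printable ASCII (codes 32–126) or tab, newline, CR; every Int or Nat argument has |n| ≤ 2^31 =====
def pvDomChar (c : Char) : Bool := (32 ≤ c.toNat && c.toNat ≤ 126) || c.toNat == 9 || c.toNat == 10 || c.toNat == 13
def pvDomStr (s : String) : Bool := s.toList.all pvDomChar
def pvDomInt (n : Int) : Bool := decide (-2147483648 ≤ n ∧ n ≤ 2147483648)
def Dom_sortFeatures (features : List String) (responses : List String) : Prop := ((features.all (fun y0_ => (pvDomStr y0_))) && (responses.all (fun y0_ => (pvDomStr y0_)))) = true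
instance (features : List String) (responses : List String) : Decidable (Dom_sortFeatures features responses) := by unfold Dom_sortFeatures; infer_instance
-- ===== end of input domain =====

-- B replaces A's per-feature [index, count] dict and comparison sort by a counting (bucket)
-- sort over precomputed response word-sets (objective: alternative, same observable result).
-- Both A and B mutate the features list in place in Python; the equivalence proved here is
-- about the return value.



-- ===== PORT A =====
-- d = {}; for idx, feat in enumerate(features): d[feat] = [idx, 0]

def pvInitA (features : List String) : PySem.Dict String (Int × Int) :=
  (PySem.List.enumerate features).foldl (fun d p => d.insert p.2 (p.1, (0 : Int))) PySem.Dict.empty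

-- for res in responses: for word in set(res.split()): if word in d: d[word][1] += 1

def pvCountA (responses : List String) (d : PySem.Dict String (Int × Int)) : PySem.Dict String (Int × Int) :=
  responses.foldl (fun d res =>
    (PySem.Set.ofList (PySem.Str.split₀ res)).foldl
      (fun d word => if d.contains word then d.modify word ((0 : Int), (0 : Int)) (fun p => (p.1, p.2 + 1)) else d) d) d

-- features.sort(key=lambda x: [-d[x][1], d[x][0]]); return features

def sortFeatures (features : List String) (responses : List String) : List String :=
  let d := pvInitA features
  let d := pvCountA responses d
  PySem.List.sorted2 features (fun x => -((d.getD x (0, 0)).2)) (fun x => (d.getD x (0, 0)).1)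

-- ===== PORT B =====
-- word_sets = [set(res.split()) for res in responses]

def pvWordSets (responses : List String) : List (PySem.Set String) :=
  responses.map (fun res => PySem.Set.ofList (PySem.Str.split₀ res))

-- c = sum(1 for s in word_sets if f in s)

def pvCnt (wordSets : List (PySem.Set String)) (f : String) : Nat :=
  wordSets.countP (fun s => decide (f ∈ s))

-- buckets = [[] for _ in range(len(responses)+1)]; for f in features: buckets[c].append(f)

def pvBuckets (features : List String) (wordSets : List (PySem.Set String))
    (init : List (List String)) : List (List String) :=
  features.foldl (fun bs f => bs.modify (pvCnt wordSets f) (fun b => b ++ [f])) init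

-- features[:] = [f for b in reversed(buckets) for f in b]; return features

def sortFeatures_alt (features : List String) (responses : List String) : List String :=
  let wordSets := pvWordSets responses
  let buckets := pvBuckets features wordSets (List.replicate (responses.length + 1) [])
  buckets.reverse.flatMap (fun b => b)

-- ===== PRECONDITION & SPEC =====
-- pvContig fs: every feature value's occurrences in fs form one contiguous block (trivially true for duplicate-free lists)

def pvContig : List String → Bool
  | [] => true
  | x :: t => (decide (x ∉ t) || (t.head? == some x)) && pvContig t

-- Pre_ excludes feature lists in which some feature value recurs after a different value
-- (scattered duplicates): there A's tie-break key is that value's last index (dict overwrite)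
-- while B's buckets keep first-occurrence order — an accidental-order corner neither
-- behaviour is specified for.
def Pre_sortFeatures (features : List String) (_responses : List String) : Prop := pvContig features = true
instance (features : List String) (responses : List String) : Decidable (Pre_sortFeatures features responses) := by unfold Pre_sortFeatures; infer_instance

def pvWitness_sortFeatures : List String × List String := (["cool", "battery"], ["cool battery", "battery is cool", "battery"])

def Spec_sortFeatures (features : List String) (responses : List String) (out : List String) : Prop := out = sortFeatures_alt features responses
instance (features : List String) (responses : List String) (out : List String) : Decidable (Spec_sortFeatures features responses out) := by unfold Spec_sortFeatures; infer_instance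

-- ===== CLAIM (what is proved, stated in full; the proofs are below) =====
def Claim_equal_sortFeatures : Prop := ∀ (features : List String) (responses : List String), Dom_sortFeatures features responses → Pre_sortFeatures features responses → Spec_sortFeatures features responses (sortFeatures features responses)

-- ===== LEMMAS AND PROOFS =====

-- the number of responses whose word set contains x, as an Int
def pvRespCount (responses : List String) (x : String) : Int :=
  (responses.map (fun r => ((PySem.Set.ofList (PySem.Str.split₀ r)).count x : Int))).sum

theorem pvRespCount_eq_cnt (responses : List String) (x : String) :
    pvRespCount responses x = (pvCnt (pvWordSets responses) x : Int) := by
  induction responses with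
  | nil => simp [pvRespCount, pvCnt, pvWordSets]
  | cons r rs ih =>
      simp only [pvRespCount, pvCnt, pvWordSets, List.map_cons, List.sum_cons, List.countP_cons] at *
      rw [ih]
      by_cases hx : x ∈ PySem.Set.ofList (PySem.Str.split₀ r)
      · rw [List.count_eq_one_of_mem (PySem.Set.nodup_ofList _) hx]
        simp [hx]
        ring
      · rw [List.count_eq_zero_of_not_mem hx]
        simp [hx]

-- ---------- A-side: the final dict values ----------

theorem pvInnerA_contains (S : List String) (d : PySem.Dict String (Int × Int)) (y : String) :
    (S.foldl (fun d word => if d.contains word then d.modify word ((0 : Int), (0 : Int)) (fun p => (p.1, p.2 + 1)) else d) d).contains y = d.contains y := by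
  induction S generalizing d with
  | nil => rfl
  | cons w S ih =>
      simp only [List.foldl_cons]
      by_cases hw : d.contains w = true
      · rw [if_pos hw, ih, PySem.Dict.contains_modify]
        by_cases hyw : y = w
        · subst hyw; simp [hw]
        · simp [hyw, beq_iff_eq]
      · rw [if_neg hw, ih]

theorem pvInnerA_getD (S : List String) (d : PySem.Dict String (Int × Int)) (x : String)
    (hx : d.contains x = true) :
    (S.foldl (fun d word => if d.contains word then d.modify word ((0 : Int), (0 : Int)) (fun p => (p.1, p.2 + 1)) else d) d).getD x (0, 0)
      = ((d.getD x (0, 0)).1, (d.getD x (0, 0)).2 + (S.count x : Int)) := by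
  induction S generalizing d with
  | nil => simp
  | cons w S ih =>
      simp only [List.foldl_cons]
      by_cases hw : d.contains w = true
      · rw [if_pos hw]
        rw [ih _ (by rw [PySem.Dict.contains_modify]; simp [hx])]
        rw [PySem.Dict.getD_modify]
        by_cases hxw : x = w
        · subst hxw
          simp [Int.add_assoc]
          ring
        · simp [hxw, Ne.symm hxw]
      · rw [if_neg hw, ih _ hx]
        by_cases hxw : x = w
        · subst hxw; rw [hx] at hw; simp at hw
        · simp [Ne.symm hxw]

theorem pvCountA_getD (responses : List String) (d : PySem.Dict String (Int × Int)) (x : String)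
    (hx : d.contains x = true) :
    (pvCountA responses d).getD x (0, 0)
      = ((d.getD x (0, 0)).1, (d.getD x (0, 0)).2 + pvRespCount responses x) := by
  induction responses generalizing d with
  | nil => simp [pvCountA, pvRespCount]
  | cons r rs ih =>
      simp only [pvCountA, List.foldl_cons] at *
      rw [ih _ (by rw [pvInnerA_contains]; exact hx), pvInnerA_getD _ _ _ hx]
      simp [pvRespCount]
      ring

theorem pvContig_tail (x : String) (t : List String) (h : pvContig (x :: t) = true) : pvContig t = true := by
  simp [pvContig] at h; exact h.2

theorem pvContig_head (x : String) (t : List String) (h : pvContig (x :: t) = true) (hx : x ∈ t) :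
    ∃ t', t = x :: t' := by
  simp [pvContig] at h
  rcases h.1 with h1 | h1
  · exact absurd hx h1
  · cases t with
    | nil => simp at hx
    | cons y t' =>
        simp at h1
        exact ⟨t', by rw [h1]⟩

theorem pvInsertBy_congr (p1 p2 : String → String → Bool) (x : String) :
    ∀ (acc : List String), (∀ y ∈ acc, p1 x y = p2 x y) →
    PySem.List.insertBy p1 x acc = PySem.List.insertBy p2 x acc := by
  intro acc
  induction acc with
  | nil => intro _; rfl
  | cons y ys ih =>
      intro h
      have hy : p1 x y = p2 x y := h y (by simp)
      by_cases hb : p2 x y = true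
      · simp [PySem.List.insertBy, hy, hb]
      · have hb' : p2 x y = false := eq_false_of_ne_true hb
        rw [hb'] at hy
        simp only [PySem.List.insertBy, hy, hb', Bool.false_eq_true, if_false]
        rw [ih (fun z hz => h z (by simp [hz]))]

theorem pvFoldl_insertBy_congr (p1 p2 : String → String → Bool) :
    ∀ (fs acc : List String), (∀ x ∈ fs, ∀ y ∈ acc, p1 x y = p2 x y) →
    fs.Pairwise (fun y x => p1 x y = p2 x y) →
    fs.foldl (fun acc x => PySem.List.insertBy p1 x acc) acc
      = fs.foldl (fun acc x => PySem.List.insertBy p2 x acc) acc := by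
  intro fs
  induction fs with
  | nil => intro acc _ _; rfl
  | cons x fs ih =>
      intro acc hacc hp
      rw [List.pairwise_cons] at hp
      simp only [List.foldl_cons]
      rw [pvInsertBy_congr p1 p2 x acc (hacc x (by simp))]
      apply ih
      · intro z hz y hy
        rcases (PySem.List.mem_insertBy p2 x y acc).mp hy with rfl | hy
        · exact hp.1 z hz
        · exact hacc z (by simp [hz]) y hy
      · exact hp.2

theorem pvInitA_fold (fs : List String) : ∀ (n : Int) (d : PySem.Dict String (Int × Int)), pvContig fs = true →
    (∀ x, x ∉ fs → ((PySem.List.enumerate fs n).foldl (fun d p => d.insert p.2 (p.1, (0 : Int))) d).getD x (0, 0) = d.getD x (0, 0)) ∧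
    (∀ x, ((PySem.List.enumerate fs n).foldl (fun d p => d.insert p.2 (p.1, (0 : Int))) d).contains x = (decide (x ∈ fs) || d.contains x)) ∧
    (∀ x ∈ fs, n ≤ (((PySem.List.enumerate fs n).foldl (fun d p => d.insert p.2 (p.1, (0 : Int))) d).getD x (0, 0)).1) ∧
    (∀ x ∈ fs, (((PySem.List.enumerate fs n).foldl (fun d p => d.insert p.2 (p.1, (0 : Int))) d).getD x (0, 0)).2 = 0) ∧
    fs.Pairwise (fun a b => (((PySem.List.enumerate fs n).foldl (fun d p => d.insert p.2 (p.1, (0 : Int))) d).getD a (0, 0)).1 ≤ (((PySem.List.enumerate fs n).foldl (fun d p => d.insert p.2 (p.1, (0 : Int))) d).getD b (0, 0)).1) := by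
  induction fs with
  | nil => intro n d _; simp
  | cons f t ih =>
      intro n d hct
      have hct' : pvContig t = true := pvContig_tail f t hct
      have henum : PySem.List.enumerate (f :: t) n = (n, f) :: PySem.List.enumerate t (n + 1) := by
        simp [PySem.List.enumerate]
      obtain ⟨ihA, ihB, ihC, ihE, ihD⟩ := ih (n + 1) (d.insert f (n, 0)) hct'
      have hfget : ((PySem.List.enumerate (f :: t) n).foldl (fun d p => d.insert p.2 (p.1, (0 : Int))) d).getD f (0, 0)
          = ((PySem.List.enumerate t (n + 1)).foldl (fun d p => d.insert p.2 (p.1, (0 : Int))) (d.insert f (n, 0))).getD f (0, 0) := by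
        rw [henum, List.foldl_cons]
      refine ⟨?_, ?_, ?_, ?_, ?_⟩
      · intro x hx
        rw [List.mem_cons, not_or] at hx
        rw [henum, List.foldl_cons, ihA x hx.2, PySem.Dict.getD_insert_of_ne _ _ _ hx.1]
      · intro x
        rw [henum, List.foldl_cons, ihB x, PySem.Dict.contains_insert]
        by_cases hxf : x = f
        · subst hxf; simp
        · have hbf : (x == f) = false := by simp [hxf]
          simp [List.mem_cons, hxf, hbf]
      · intro x hx
        rw [List.mem_cons] at hx
        rcases hx with rfl | hx
        · by_cases hft : x ∈ t
          · rw [hfget]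
            have := ihC x hft
            omega
          · rw [hfget, ihA x hft, PySem.Dict.getD_insert_self]
        · rw [henum, List.foldl_cons]
          dsimp only
          have := ihC x hx
          omega
      · intro x hx
        rw [List.mem_cons] at hx
        rcases hx with rfl | hx
        · by_cases hft : x ∈ t
          · rw [hfget]; exact ihE x hft
          · rw [hfget, ihA x hft, PySem.Dict.getD_insert_self]
        · rw [henum, List.foldl_cons]
          dsimp only
          exact ihE x hx
      · rw [List.pairwise_cons]
        constructor
        · intro b hb
          by_cases hft : f ∈ t
          · obtain ⟨t', rfl⟩ := pvContig_head f t hct hft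
            rw [List.pairwise_cons] at ihD
            rw [List.mem_cons] at hb
            rw [henum, List.foldl_cons]
            dsimp only
            rcases hb with rfl | hb
            · exact le_refl _
            · exact ihD.1 b hb
          · rw [hfget, ihA f hft, PySem.Dict.getD_insert_self]
            rw [henum, List.foldl_cons]
            dsimp only
            have := ihC b hb
            omega
        · rw [henum, List.foldl_cons]
          dsimp only
          exact ihD

-- A equals a plain stable sort on -pvRespCount
theorem pvA_eq_sorted (features responses : List String) (hct : pvContig features = true) :
    sortFeatures features responses
      = PySem.List.sorted features (fun f => -(pvRespCount responses f)) := by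
  obtain ⟨h0A, h0B, h0C, h0E, h0D⟩ := pvInitA_fold features 0 PySem.Dict.empty hct
  have hd0 : pvInitA features = (PySem.List.enumerate features 0).foldl (fun d p => d.insert p.2 (p.1, (0 : Int))) PySem.Dict.empty := rfl
  set d0 := pvInitA features with hd0def
  rw [← hd0] at h0A h0B h0C h0E h0D
  set dA := pvCountA responses d0 with hdA
  have hmem : ∀ x ∈ features, d0.contains x = true := by
    intro x hx
    rw [h0B x]
    simp [hx]
  have hAval : ∀ x ∈ features, dA.getD x (0, 0) = ((d0.getD x (0, 0)).1, pvRespCount responses x) := by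
    intro x hx
    rw [hdA, pvCountA_getD _ _ _ (hmem x hx), h0E x hx]
    simp
  have hpair : features.Pairwise (fun y x =>
      (decide (-((dA.getD x (0, 0)).2) < -((dA.getD y (0, 0)).2)) ||
        (!decide (-((dA.getD y (0, 0)).2) < -((dA.getD x (0, 0)).2)) &&
          decide ((dA.getD x (0, 0)).1 < (dA.getD y (0, 0)).1)))
      = decide (-(pvRespCount responses x) < -(pvRespCount responses y))) := by
    refine h0D.imp_of_mem ?_
    intro a b ha hb hle
    have ha' := hAval a ha
    have hb' := hAval b hb
    have hidx : ¬ ((dA.getD b (0, 0)).1 < (dA.getD a (0, 0)).1) := by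
      rw [ha', hb']
      simpa using hle
    have hca : -((dA.getD a (0, 0)).2) = -(pvRespCount responses a) := by rw [ha']
    have hcb : -((dA.getD b (0, 0)).2) = -(pvRespCount responses b) := by rw [hb']
    rw [decide_eq_false hidx, hca, hcb]
    simp
  show PySem.List.sorted2 features (fun x => -((dA.getD x (0, 0)).2)) (fun x => (dA.getD x (0, 0)).1) = _
  rw [PySem.List.sorted_eq_foldl_insertBy]
  show features.foldl (fun acc x => PySem.List.insertBy _ x acc) [] = _
  exact pvFoldl_insertBy_congr _ _ features [] (by simp) hpair

-- ---------- stable sort = concatenation of key-level filters ----------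

def pvConcatF (ks : List Int) (xs : List String) (key : String → Int) : List String :=
  ks.flatMap (fun v => xs.filter (fun x => decide (key x = v)))

theorem pv_mem_concatF (ks : List Int) (xs : List String) (key : String → Int) (y : String)
    (h : y ∈ pvConcatF ks xs key) : key y ∈ ks := by
  simp only [pvConcatF, List.mem_flatMap, List.mem_filter, decide_eq_true_eq] at h
  obtain ⟨v, hv, _, hk⟩ := h
  rw [hk]; exact hv

theorem pvInsertBy_append_not (p : String → String → Bool) (x : String) (as bs : List String)
    (h : ∀ a ∈ as, p x a = false) :
    PySem.List.insertBy p x (as ++ bs) = as ++ PySem.List.insertBy p x bs := by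
  induction as with
  | nil => simp
  | cons a as ih =>
      have ha : p x a = false := h a (by simp)
      simp only [List.cons_append, PySem.List.insertBy, ha, Bool.false_eq_true, if_false]
      rw [ih (fun a ha' => h a (by simp [ha']))]

theorem pvInsertBy_all (p : String → String → Bool) (x : String) (bs : List String)
    (h : ∀ b ∈ bs, p x b = true) :
    PySem.List.insertBy p x bs = x :: bs := by
  cases bs with
  | nil => rfl
  | cons b bs => simp [PySem.List.insertBy, h b (by simp)]

theorem pvInsert_concatF (key : String → Int) (x : String) :
    ∀ (ks : List Int) (xs : List String), ks.Pairwise (· < ·) → key x ∈ ks →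
    PySem.List.insertBy (fun a b => decide (key a < key b)) x (pvConcatF ks xs key)
      = pvConcatF ks (xs ++ [x]) key := by
  intro ks
  induction ks with
  | nil => intro xs _ h; simp at h
  | cons v ks ih =>
      intro xs hpw hx
      rw [List.pairwise_cons] at hpw
      have hsplit : ∀ ys : List String, pvConcatF (v :: ks) ys key
          = ys.filter (fun y => decide (key y = v)) ++ pvConcatF ks ys key := by
        intro ys; simp [pvConcatF]
      by_cases hv : key x = v
      · -- x goes at the end of the v-bucket
        rw [hsplit xs, pvInsertBy_append_not _ _ _ _ (by
          intro a ha
          rw [List.mem_filter] at ha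
          have : key a = v := by simpa using ha.2
          simp [this, hv])]
        rw [pvInsertBy_all _ _ _ (by
          intro b hb
          have hkb := pv_mem_concatF ks xs key b hb
          have : v < key b := hpw.1 _ hkb
          simp [hv]; omega)]
        have hnotks : ∀ w ∈ ks, key x ≠ w := by
          intro w hw
          have : v < w := hpw.1 w hw
          omega
        have hrest : pvConcatF ks (xs ++ [x]) key = pvConcatF ks xs key := by
          simp only [pvConcatF]
          apply List.flatMap_congr
          intro w hw
          rw [List.filter_append]
          have : (List.filter (fun y => decide (key y = w)) [x]) = [] := by
            simp [hnotks w hw]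
          rw [this, List.append_nil]
        have hbucket : (xs ++ [x]).filter (fun y => decide (key y = v))
            = xs.filter (fun y => decide (key y = v)) ++ [x] := by
          rw [List.filter_append]
          simp [hv]
        rw [hsplit (xs ++ [x]), hbucket, hrest]
        simp
      · -- x belongs to a later bucket
        have hx' : key x ∈ ks := by
          rcases List.mem_cons.mp hx with h | h
          · exact absurd h hv
          · exact h
        have hvx : v < key x := hpw.1 _ hx'
        rw [hsplit xs, pvInsertBy_append_not _ _ _ _ (by
          intro a ha
          rw [List.mem_filter] at ha
          have : key a = v := by simpa using ha.2
          simp [this]; omega)]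
        rw [ih xs hpw.2 hx']
        have hbucket : (xs ++ [x]).filter (fun y => decide (key y = v))
            = xs.filter (fun y => decide (key y = v)) := by
          rw [List.filter_append]
          have : (List.filter (fun y => decide (key y = v)) [x]) = [] := by simp [hv]
          rw [this, List.append_nil]
        rw [hsplit (xs ++ [x]), hbucket]

theorem pvSorted_eq_concatF (key : String → Int) (ks : List Int) (hpw : ks.Pairwise (· < ·)) :
    ∀ (xs : List String), (∀ x ∈ xs, key x ∈ ks) →
    PySem.List.sorted xs key = pvConcatF ks xs key := by
  intro xs
  induction xs using List.reverseRecOn with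
  | nil => intro _; simp [pvConcatF, PySem.List.sorted_eq_foldl_insertBy]
  | append_singleton xs x ih =>
      intro h
      have hsorted : PySem.List.sorted (xs ++ [x]) key
          = PySem.List.insertBy (fun a b => decide (key a < key b)) x (PySem.List.sorted xs key) := by
        rw [PySem.List.sorted_eq_foldl_insertBy, PySem.List.sorted_eq_foldl_insertBy, List.foldl_append]
        rfl
      rw [hsorted, ih (fun y hy => h y (by simp [hy]))]
      exact pvInsert_concatF key x ks xs hpw (h x (by simp))

-- ---------- B equals the same concatenation of filters ----------

theorem pvBuckets_getElem? (ws : List (PySem.Set String)) :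
    ∀ (fs : List String) (init : List (List String)) (i : Nat),
    (pvBuckets fs ws init)[i]?
      = (init[i]?).map (fun b => b ++ fs.filter (fun f => decide (pvCnt ws f = i))) := by
  intro fs
  induction fs with
  | nil =>
      intro init i
      cases h : init[i]? <;> simp [pvBuckets, h]
  | cons f fs ih =>
      intro init i
      have : pvBuckets (f :: fs) ws init
          = pvBuckets fs ws (init.modify (pvCnt ws f) (fun b => b ++ [f])) := rfl
      rw [this, ih, List.getElem?_modify]
      by_cases hc : pvCnt ws f = i
      · subst hc
        cases h : init[pvCnt ws f]? with
        | none => simp [h]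
        | some b => simp [h, List.filter_cons]
      · cases h : init[i]? with
        | none => simp [h]
        | some b => simp [h, hc]

theorem pvB_eq_concatF (features responses : List String) :
    sortFeatures_alt features responses
      = pvConcatF (((List.range (responses.length + 1)).reverse).map (fun i : Nat => -(i : Int)))
          features (fun f => -(pvCnt (pvWordSets responses) f : Int)) := by
  have hb : pvBuckets features (pvWordSets responses) (List.replicate (responses.length + 1) [])
      = (List.range (responses.length + 1)).map
          (fun i => features.filter (fun f => decide (pvCnt (pvWordSets responses) f = i))) := by
    apply List.ext_getElem?
    intro i
    rw [pvBuckets_getElem?]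
    by_cases hi : i < responses.length + 1
    · rw [List.getElem?_replicate, List.getElem?_map, List.getElem?_range hi]
      simp [hi]
    · rw [List.getElem?_eq_none (by simpa using hi), List.getElem?_eq_none (by simpa using hi)]
      rfl
  show (pvBuckets features (pvWordSets responses) (List.replicate (responses.length + 1) [])).reverse.flatMap (fun b => b) = _
  rw [hb, ← List.map_reverse, pvConcatF, List.flatMap_map, List.flatMap_map]
  apply List.flatMap_congr
  intro i _
  apply List.filter_congr
  intro f _
  simp

-- ---------- putting it together ----------

theorem pv_main (features responses : List String) (hct : pvContig features = true) :
    sortFeatures features responses = sortFeatures_alt features responses := by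
  have hkey : (fun f => -(pvRespCount responses f))
      = (fun f => -(pvCnt (pvWordSets responses) f : Int)) := by
    funext f
    rw [pvRespCount_eq_cnt]
  have hpw : (((List.range (responses.length + 1)).reverse).map (fun i : Nat => -(i : Int))).Pairwise (· < ·) := by
    rw [List.pairwise_map, List.pairwise_reverse]
    have := List.pairwise_lt_range (n := responses.length + 1)
    refine this.imp ?_
    intro a b hab
    simp
    omega
  have hmemk : ∀ f ∈ features,
      (-(pvCnt (pvWordSets responses) f : Int)) ∈ (((List.range (responses.length + 1)).reverse).map (fun i : Nat => -(i : Int))) := by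
    intro f _
    rw [List.mem_map]
    refine ⟨pvCnt (pvWordSets responses) f, ?_, rfl⟩
    rw [List.mem_reverse, List.mem_range]
    have hle : pvCnt (pvWordSets responses) f ≤ (pvWordSets responses).length := List.countP_le_length
    have hlen : (pvWordSets responses).length = responses.length := by simp [pvWordSets]
    omega
  rw [pvA_eq_sorted features responses hct, hkey,
    pvSorted_eq_concatF _ _ hpw features hmemk, pvB_eq_concatF]

-- ===== VERDICT (by name: the statement is the Claim_ definition above) =====
theorem sortFeatures_spec : Claim_equal_sortFeatures := by
  intro features responses _ hpre
  show sortFeatures features responses = sortFeatures_alt features responses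
  exact pv_main features responses hpre
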